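-- pv_equiv track=rewrite | github.com/CaueIwamoto/GrafosProj | GrafProjMeu.py | verificarLacos
-- ===== SOURCE A (Python) =====
-- def verificarLacos(matriz):
--     lacos = []
--     arestasMultiplas = []
--
--     #Valores que se forem maior que 0, ele será um laço; Valores maior que 1, será aresta múltipla.:
--     for linha in range(len(matriz)):
--         for coluna in range(linha, len(matriz)):
--             if linha == coluna and int(matriz[linha][coluna]) > 0:
--                 lacos.append("v{0}".format (linha+1))
--             elif int(matriz[linha][coluna]) > 1:
--                 arestasMultiplas.append("v{0} e v{1}".format (linha+1, coluna+1))
--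
--     return lacos, arestasMultiplas
-- ===== SOURCE B (Python) =====
-- def verificarLacos(matriz):
--     n = len(matriz)
--
--     def go(k):
--         if k >= n:
--             return [], []
--         lacos, arestasMultiplas = go(k + 1)
--         row = matriz[k]
--         here = ["v{0} e v{1}".format(k + 1, k + 2 + off)
--                 for off, x in enumerate(row[k + 1:n]) if int(x) > 1]
--         if int(row[k]) > 0:
--             lacos = ["v{0}".format(k + 1)] + lacos
--         return lacos, here + arestasMultiplas
--
--     return go(0)
-- ===== Notes on version B (the rewrite author's own statement) =====
-- stated objective: alternative
-- what changed: Replaces A's iterative nested index loops with accumulator appends by a recursive descent over the row index that builds both lists back-to-front by prepending, and scans each row's strict-upper part via slicing plus enumerate instead of an index range.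
import Mathlib
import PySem

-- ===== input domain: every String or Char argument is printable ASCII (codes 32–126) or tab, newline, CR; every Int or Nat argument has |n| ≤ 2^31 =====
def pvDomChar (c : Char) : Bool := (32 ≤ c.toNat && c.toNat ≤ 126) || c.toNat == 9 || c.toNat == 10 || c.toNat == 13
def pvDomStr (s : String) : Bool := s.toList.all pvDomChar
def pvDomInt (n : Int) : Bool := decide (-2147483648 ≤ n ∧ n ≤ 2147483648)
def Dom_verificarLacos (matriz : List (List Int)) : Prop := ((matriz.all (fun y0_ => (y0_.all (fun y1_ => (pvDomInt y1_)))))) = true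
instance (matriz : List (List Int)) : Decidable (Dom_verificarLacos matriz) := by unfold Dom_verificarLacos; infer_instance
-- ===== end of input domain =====

-- B replaces A's iterative nested index loops (append-accumulators) by a recursive
-- descent over the row index building both lists back-to-front via prepending, with the
-- strict-upper part of each row scanned through slicing + enumerate; objective: alternative.

-- matriz[i][j] (Pre_ guarantees the indices are in range, so the default is never taken)
def pvEntry (matriz : List (List Int)) (i j : Int) : Int :=
  PySem.List.pyGetD (PySem.List.pyGetD matriz i []) j 0

-- ===== PORT A =====
def verificarLacos (matriz : List (List Int)) : List String × List String :=
  (PySem.List.pyRange 0 matriz.length 1).foldl (fun st linha =>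
    (PySem.List.pyRange linha matriz.length 1).foldl (fun st coluna =>
      if linha = coluna ∧ pvEntry matriz linha coluna > 0 then
        (st.1 ++ ["v" ++ PySem.Int.toStr (linha + 1)], st.2)
      else if pvEntry matriz linha coluna > 1 then
        (st.1, st.2 ++ ["v" ++ PySem.Int.toStr (linha + 1) ++ " e v" ++ PySem.Int.toStr (coluna + 1)])
      else st) st) ([], [])

-- ===== PORT B =====
-- B's inner helper go(k): recursion on the remaining rows (terminates as n - k shrinks)
def pvGoAlt (matriz : List (List Int)) (n k : Int) : List String × List String :=
  if _h : k < n then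
    let p := pvGoAlt matriz n (k + 1)
    let row := PySem.List.pyGetD matriz k []
    let here := (PySem.List.enumerate (PySem.List.slice row (some (k + 1)) (some n)) 0).flatMap
      (fun ox => if ox.2 > 1 then
        ["v" ++ PySem.Int.toStr (k + 1) ++ " e v" ++ PySem.Int.toStr (k + 2 + ox.1)] else [])
    let lacos := if PySem.List.pyGetD row k 0 > 0 then ("v" ++ PySem.Int.toStr (k + 1)) :: p.1 else p.1
    (lacos, here ++ p.2)
  else ([], [])
termination_by (n - k).toNat
decreasing_by omega

def verificarLacos_alt (matriz : List (List Int)) : List String × List String :=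
  pvGoAlt matriz (matriz.length : Int) 0

-- ===== PRECONDITION & SPEC =====
-- Pre_ excludes exactly the ragged matrices on which Python A raises IndexError
-- (some row shorter than the number of rows); A returns on every other input.
def Pre_verificarLacos (matriz : List (List Int)) : Prop :=
  ∀ row ∈ matriz, matriz.length ≤ row.length
instance (matriz : List (List Int)) : Decidable (Pre_verificarLacos matriz) := by
  unfold Pre_verificarLacos; infer_instance
def pvWitness_verificarLacos : List (List Int) := [[1, 2], [0, 0]]

def Spec_verificarLacos (matriz : List (List Int)) (out : List String × List String) : Prop := out = verificarLacos_alt matriz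
instance (matriz : List (List Int)) (out : List String × List String) : Decidable (Spec_verificarLacos matriz out) := by unfold Spec_verificarLacos; infer_instance

-- ===== CLAIM (what is proved, stated in full; the proofs are below) =====
def Claim_equal_verificarLacos : Prop := ∀ (matriz : List (List Int)), Dom_verificarLacos matriz → Pre_verificarLacos matriz → Spec_verificarLacos matriz (verificarLacos matriz)

-- ===== LEMMAS AND PROOFS =====

def pvLab (i : Int) : String := "v" ++ PySem.Int.toStr (i + 1)
def pvMLab (i j : Int) : String :=
  "v" ++ PySem.Int.toStr (i + 1) ++ " e v" ++ PySem.Int.toStr (j + 1)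

-- A's off-diagonal tail of the inner loop only extends the second component.
theorem pv_tail_eq (matriz : List (List Int)) (i : Int) (l : List Int)
    (hl : ∀ x ∈ l, i ≠ x) (st : List String × List String) :
    l.foldl (fun st coluna =>
      if i = coluna ∧ pvEntry matriz i coluna > 0 then (st.1 ++ [pvLab i], st.2)
      else if pvEntry matriz i coluna > 1 then (st.1, st.2 ++ [pvMLab i coluna])
      else st) st
    = (st.1, st.2 ++ l.flatMap (fun j =>
        if pvEntry matriz i j > 1 then [pvMLab i j] else [])) := by
  induction l generalizing st with
  | nil => simp
  | cons c t ih =>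
    have hne : ¬ i = c := hl c (by simp)
    have ht : ∀ x ∈ t, i ≠ x := fun x hx => hl x (by simp [hx])
    by_cases h : pvEntry matriz i c > 1 <;>
      simp [hne, h, ih ht, List.append_assoc]

-- A's inner loop over row i (for i < n): diagonal head step, then the tail above.
theorem pv_inner_eq (matriz : List (List Int)) (i : Int)
    (hi : i < (matriz.length : Int)) (st : List String × List String) :
    (PySem.List.pyRange i matriz.length 1).foldl (fun st coluna =>
      if i = coluna ∧ pvEntry matriz i coluna > 0 then (st.1 ++ [pvLab i], st.2)
      else if pvEntry matriz i coluna > 1 then (st.1, st.2 ++ [pvMLab i coluna])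
      else st) st
    = (st.1 ++ (if pvEntry matriz i i > 0 then [pvLab i] else []),
       st.2 ++ (PySem.List.pyRange (i + 1) matriz.length 1).flatMap (fun j =>
        if pvEntry matriz i j > 1 then [pvMLab i j] else [])) := by
  rw [PySem.List.pyRange_one_cons hi, List.foldl_cons]
  have hhead : (if i = i ∧ pvEntry matriz i i > 0 then (st.1 ++ [pvLab i], st.2)
      else if pvEntry matriz i i > 1 then (st.1, st.2 ++ [pvMLab i i])
      else st)
      = (st.1 ++ (if pvEntry matriz i i > 0 then [pvLab i] else []), st.2) := by
    by_cases h : pvEntry matriz i i > 0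
    · simp [h]
    · have h1 : ¬ pvEntry matriz i i > 1 := by omega
      simp [h, h1]
  rw [hhead]
  exact pv_tail_eq matriz i _
    (fun x hx => by
      have := (PySem.List.mem_pyRange_one (a := i + 1)
        (b := (matriz.length : Int)) (x := x)).mp hx
      omega) _

-- A's outer loop over any list of row indices below n equals the two-flatMap form.
theorem pv_outer_eq (matriz : List (List Int)) (l : List Int)
    (hl : ∀ x ∈ l, x < (matriz.length : Int)) (st : List String × List String) :
    l.foldl (fun st linha =>
      (PySem.List.pyRange linha matriz.length 1).foldl (fun st coluna =>
        if linha = coluna ∧ pvEntry matriz linha coluna > 0 then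
          (st.1 ++ [pvLab linha], st.2)
        else if pvEntry matriz linha coluna > 1 then
          (st.1, st.2 ++ [pvMLab linha coluna])
        else st) st) st
    = (st.1 ++ l.flatMap (fun i => if pvEntry matriz i i > 0 then [pvLab i] else []),
       st.2 ++ l.flatMap (fun i =>
        (PySem.List.pyRange (i + 1) matriz.length 1).flatMap (fun j =>
          if pvEntry matriz i j > 1 then [pvMLab i j] else []))) := by
  induction l generalizing st with
  | nil => simp
  | cons c t ih =>
    have hc : c < (matriz.length : Int) := hl c (by simp)
    have ht : ∀ x ∈ t, x < (matriz.length : Int) := fun x hx => hl x (by simp [hx])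
    rw [List.foldl_cons, pv_inner_eq matriz c hc st, ih ht]
    simp [List.append_assoc]

-- slice unrolls one element at the front when the bounds straddle an in-range index
theorem pv_slice_cons (row : List Int) (a b : Int) (ha : 0 ≤ a) (hab : a < b)
    (hb : b ≤ (row.length : Int)) :
    PySem.List.slice row (some a) (some b)
    = row[a.toNat]'(by omega) :: PySem.List.slice row (some (a + 1)) (some b) := by
  rw [PySem.List.slice_toNat row ha (by omega), PySem.List.slice_toNat row (by omega) (by omega)]
  rw [List.drop_eq_getElem_cons (by omega)]
  have h1 : (a + 1).toNat = a.toNat + 1 := by omega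
  have h2 : b.toNat - a.toNat = (b.toNat - (a.toNat + 1)) + 1 := by omega
  rw [h1, h2, List.take_succ_cons]

-- B's slice+enumerate scan of row[a:b] equals A's index-range scan.
theorem pv_enum_eq (row : List Int) (i : Int) :
    ∀ (m : Nat) (a b s : Int), 0 ≤ a → a ≤ b → b ≤ (row.length : Int) → (b - a).toNat = m →
    (PySem.List.enumerate (PySem.List.slice row (some a) (some b)) s).flatMap
      (fun ox => if ox.2 > 1 then [pvMLab i (a - s + ox.1)] else [])
    = (PySem.List.pyRange a b 1).flatMap
      (fun j => if PySem.List.pyGetD row j 0 > 1 then [pvMLab i j] else []) := by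
  intro m
  induction m with
  | zero =>
    intro a b s ha hab hb hm
    have hba : b = a := by omega
    subst hba
    rw [PySem.List.slice_toNat row ha ha]
    simp [PySem.List.pyRange]
  | succ m ih =>
    intro a b s ha hab hb hm
    have hlt : a < b := by omega
    rw [pv_slice_cons row a b ha hlt hb, PySem.List.enumerate_cons, List.flatMap_cons,
      PySem.List.pyRange_one_cons hlt, List.flatMap_cons]
    have hget : PySem.List.pyGetD row a 0 = row[a.toNat]'(by omega) := by
      rw [PySem.List.pyGetD_of_nonneg row 0 ha, List.getD_eq_getElem _ _ (by omega)]
    have hhead : (if row[a.toNat]'(by omega) > 1 then [pvMLab i (a - s + s)] else [])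
        = (if PySem.List.pyGetD row a 0 > 1 then [pvMLab i a] else []) := by
      rw [hget]
      have hss : a - s + s = a := by omega
      rw [hss]
    have htail := ih (a + 1) b (s + 1) (by omega) (by omega) hb (by omega)
    have htail' : (PySem.List.enumerate (PySem.List.slice row (some (a + 1)) (some b)) (s + 1)).flatMap
        (fun ox => if ox.2 > 1 then [pvMLab i (a - s + ox.1)] else [])
        = (PySem.List.pyRange (a + 1) b 1).flatMap
          (fun j => if PySem.List.pyGetD row j 0 > 1 then [pvMLab i j] else []) := by
      rw [← htail]
      congr 1
      funext ox
      congr 3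
      omega
    rw [hhead, htail']

-- the k-th row is a member of the matrix (to use Pre_ on it)
theorem pv_row_mem (matriz : List (List Int)) (k : Int) (h0 : 0 ≤ k)
    (hk : k < (matriz.length : Int)) :
    PySem.List.pyGetD matriz k [] ∈ matriz := by
  rw [PySem.List.pyGetD_of_nonneg matriz [] h0, List.getD_eq_getElem _ _ (by omega)]
  exact List.getElem_mem _

-- B's recursion from index k equals the two-flatMap form over pyRange k n.
theorem pv_goAlt_eq (matriz : List (List Int)) (hpre : Pre_verificarLacos matriz) :
    ∀ (m : Nat) (k : Int), 0 ≤ k → ((matriz.length : Int) - k).toNat = m →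
    pvGoAlt matriz (matriz.length : Int) k
    = ((PySem.List.pyRange k matriz.length 1).flatMap
        (fun i => if pvEntry matriz i i > 0 then [pvLab i] else []),
       (PySem.List.pyRange k matriz.length 1).flatMap (fun i =>
        (PySem.List.pyRange (i + 1) matriz.length 1).flatMap (fun j =>
          if pvEntry matriz i j > 1 then [pvMLab i j] else []))) := by
  intro m
  induction m with
  | zero =>
    intro k h0 hm
    have hge : ¬ k < (matriz.length : Int) := by omega
    rw [pvGoAlt]
    simp [hge, PySem.List.pyRange]
  | succ m ih =>
    intro k h0 hm
    have hlt : k < (matriz.length : Int) := by omega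
    rw [pvGoAlt]
    simp only [hlt, dif_pos]
    rw [ih (k + 1) (by omega) (by omega)]
    have hrowlen : (matriz.length : Int) ≤ ((PySem.List.pyGetD matriz k []).length : Int) := by
      exact_mod_cast hpre _ (pv_row_mem matriz k h0 hlt)
    have henum := pv_enum_eq (PySem.List.pyGetD matriz k []) k
      (((matriz.length : Int) - (k + 1)).toNat) (k + 1) (matriz.length : Int) 0
      (by omega) (by omega) hrowlen rfl
    have henum' : (PySem.List.enumerate
        (PySem.List.slice (PySem.List.pyGetD matriz k []) (some (k + 1)) (some (matriz.length : Int))) 0).flatMap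
        (fun ox => if ox.2 > 1 then
          ["v" ++ PySem.Int.toStr (k + 1) ++ " e v" ++ PySem.Int.toStr (k + 2 + ox.1)] else [])
        = (PySem.List.pyRange (k + 1) (matriz.length : Int) 1).flatMap
          (fun j => if pvEntry matriz k j > 1 then [pvMLab k j] else []) := by
      simp only [pvEntry]
      convert henum using 2
      funext ox
      unfold pvMLab
      by_cases h : ox.2 > 1
      · simp only [h, if_pos]
        rw [show k + 1 - 0 + ox.1 + 1 = k + 2 + ox.1 from by ring]
      · simp [h]
    rw [PySem.List.pyRange_one_cons hlt, List.flatMap_cons, List.flatMap_cons, henum']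
    by_cases hd : 0 < PySem.List.pyGetD (PySem.List.pyGetD matriz k []) k 0 <;>
      simp [pvEntry, hd, pvLab]

-- ===== VERDICT (by name: the statement is the Claim_ definition above) =====
theorem verificarLacos_spec : Claim_equal_verificarLacos := by
  intro matriz _ hpre
  unfold Spec_verificarLacos verificarLacos verificarLacos_alt
  rw [show (fun st (linha : Int) =>
      (PySem.List.pyRange linha matriz.length 1).foldl (fun st coluna =>
        if linha = coluna ∧ pvEntry matriz linha coluna > 0 then
          (st.1 ++ ["v" ++ PySem.Int.toStr (linha + 1)], st.2)
        else if pvEntry matriz linha coluna > 1 then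
          (st.1, st.2 ++ ["v" ++ PySem.Int.toStr (linha + 1) ++ " e v" ++ PySem.Int.toStr (coluna + 1)])
        else st) st)
    = (fun st (linha : Int) =>
      (PySem.List.pyRange linha matriz.length 1).foldl (fun st coluna =>
        if linha = coluna ∧ pvEntry matriz linha coluna > 0 then
          (st.1 ++ [pvLab linha], st.2)
        else if pvEntry matriz linha coluna > 1 then
          (st.1, st.2 ++ [pvMLab linha coluna])
        else st) st) from rfl]
  rw [pv_outer_eq matriz _
    (fun x hx => ((PySem.List.mem_pyRange_one (a := 0)
      (b := (matriz.length : Int)) (x := x)).mp hx).2) ([], [])]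
  rw [pv_goAlt_eq matriz hpre ((matriz.length : Int) - 0).toNat 0 le_rfl rfl]
  simp
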